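-- pv_equiv track=rewrite | github.com/CrisPirat/devsu-jam-2021-preclasificatory | Quetion02.py | maximumElementWithMinimunSum
-- ===== SOURCE A (Python) =====
-- def sumOfElement(numbers, number):
--     sum = 0
--     for n in numbers:
--         if n != number:
--             sum += n
--     return sum
--
-- def searchMaximum(numbers):
--     max = numbers[0]
--     for n in numbers:
--         if max < n:
--             max = n
--     return max
--
-- def searchMinimum(numbers):
--     min = numbers[0]
--     for n in numbers:
--         if min > n:
--             min = n
--     return min
--
-- def searchIndexValue(numbers, number):
--     indexNumbers = []
--     index = 0
--     for n in numbers: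
--         if number == n:
--             indexNumbers.append(index)
--         index += 1
--     return indexNumbers
--
-- def getOnlyIndexesValues(numbers,indexes):
--     values = []
--     for n in indexes:
--         values.append(numbers[n])
--     return values
--
-- def maximumElementWithMinimunSum(numbers):
--     numbersSum =[]
--     for n in numbers:
--         numbersSum.append(sumOfElement(numbers,n))
--     minSum = searchMinimum(numbersSum)
--     indexNumbersMinimunSum = searchIndexValue(numbersSum,minSum)
--     numbersValues = getOnlyIndexesValues(numbers,indexNumbersMinimunSum)
--     maxValue = searchMaximum(numbersValues)
--     return maxValue
-- ===== SOURCE B (Python) =====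
-- def maximumElementWithMinimunSum(numbers):
--     # O(n): the "sum excluding all occurrences of n" is total - n*count(n),
--     # so one counting pass + one scan keeping (min sum, max value among its achievers).
--     total = sum(numbers)
--     counts = {}
--     for n in numbers:
--         counts[n] = counts.get(n, 0) + 1
--     best_sum = None
--     best_val = None
--     for n in numbers:
--         s = total - n * counts[n]
--         if best_sum is None or s < best_sum or (s == best_sum and n > best_val):
--             best_sum, best_val = s, n
--     return best_val
-- ===== Notes on version B (the rewrite author's own statement) =====
-- stated objective: faster
-- what changed: B replaces A's O(n^2) per-element exclusion sums plus min/index-list/max pipeline with one counting pass (sum excluding n = total - n*count(n)) and a single scan keeping the (minimal sum, maximal value) pair.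
import Mathlib
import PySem

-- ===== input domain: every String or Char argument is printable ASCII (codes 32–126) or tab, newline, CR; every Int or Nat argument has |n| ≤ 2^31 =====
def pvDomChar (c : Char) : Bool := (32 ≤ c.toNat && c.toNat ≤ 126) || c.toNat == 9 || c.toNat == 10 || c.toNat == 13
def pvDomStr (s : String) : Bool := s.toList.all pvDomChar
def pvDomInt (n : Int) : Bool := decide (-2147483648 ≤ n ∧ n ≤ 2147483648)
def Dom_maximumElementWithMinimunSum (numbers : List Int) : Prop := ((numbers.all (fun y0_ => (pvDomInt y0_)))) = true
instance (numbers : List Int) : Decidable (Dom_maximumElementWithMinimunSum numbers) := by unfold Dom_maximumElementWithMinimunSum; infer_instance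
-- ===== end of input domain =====

-- B replaces A's quadratic per-element exclusion sums and the index bookkeeping by one counting
-- pass (sum-excluding-n = total - n*count(n)) and a single best-(minSum, maxValue) scan.

-- ===== PORT A =====
def sumOfElement (numbers : List Int) (number : Int) : Int :=
  numbers.foldl (fun s n => if n ≠ number then s + n else s) 0

def searchMaximum (numbers : List Int) : Int :=
  -- numbers[0] raises IndexError on []; under Pre_ every list reaching here is nonempty
  numbers.foldl (fun m n => if m < n then n else m) (numbers.headD 0)

def searchMinimum (numbers : List Int) : Int :=
  numbers.foldl (fun m n => if m > n then n else m) (numbers.headD 0)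

def searchIndexValue (numbers : List Int) (number : Int) : List Int :=
  (numbers.foldl (fun (st : List Int × Int) n =>
      if number = n then (st.1 ++ [st.2], st.2 + 1) else (st.1, st.2 + 1)) ([], 0)).1

def getOnlyIndexesValues (numbers : List Int) (indexes : List Int) : List Int :=
  -- indexes produced by searchIndexValue are always in range, so the .getD 0 default is unreachable
  indexes.foldl (fun vs n => vs ++ [(PySem.List.pyGet? numbers n).getD 0]) []

def maximumElementWithMinimunSum (numbers : List Int) : Int :=
  let numbersSum := numbers.foldl (fun acc n => acc ++ [sumOfElement numbers n]) []
  let minSum := searchMinimum numbersSum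
  let indexNumbersMinimunSum := searchIndexValue numbersSum minSum
  let numbersValues := getOnlyIndexesValues numbers indexNumbersMinimunSum
  searchMaximum numbersValues

-- ===== PORT B =====
def maximumElementWithMinimunSum_alt (numbers : List Int) : Int :=
  let total := numbers.foldl (· + ·) 0
  let counts := numbers.foldl (fun (d : PySem.Dict Int Int) n => d.insert n (d.getD n 0 + 1))
      PySem.Dict.empty
  let best := numbers.foldl (fun (b : Option (Int × Int)) n =>
      let s := total - n * counts.getD n 0
      match b with
      | none => some (s, n)
      | some (bs, bv) => if s < bs ∨ (s = bs ∧ bv < n) then some (s, n) else some (bs, bv)) none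
  match best with
  | some (_, v) => v
  | none => 0   -- unreachable under Pre_ (Python B returns None only for [])

-- ===== PRECONDITION & SPEC =====
-- Pre_ excludes only the empty list, on which A raises IndexError (numbers[0]).
def Pre_maximumElementWithMinimunSum (numbers : List Int) : Prop := numbers ≠ []
instance (numbers : List Int) : Decidable (Pre_maximumElementWithMinimunSum numbers) := by
  unfold Pre_maximumElementWithMinimunSum; infer_instance

def pvWitness_maximumElementWithMinimunSum : List Int := [3, -1, 3, 2]

def Spec_maximumElementWithMinimunSum (numbers : List Int) (out : Int) : Prop := out = maximumElementWithMinimunSum_alt numbers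
instance (numbers : List Int) (out : Int) : Decidable (Spec_maximumElementWithMinimunSum numbers out) := by unfold Spec_maximumElementWithMinimunSum; infer_instance

-- ===== CLAIM (what is proved, stated in full; the proofs are below) =====
def Claim_equal_maximumElementWithMinimunSum : Prop := ∀ (numbers : List Int), Dom_maximumElementWithMinimunSum numbers → Pre_maximumElementWithMinimunSum numbers → Spec_maximumElementWithMinimunSum numbers (maximumElementWithMinimunSum numbers)

-- ===== LEMMAS AND PROOFS =====

theorem sumOfElement_foldl (v : Int) : ∀ (xs : List Int) (a : Int),
    xs.foldl (fun s n => if n ≠ v then s + n else s) a = a + xs.sum - v * xs.count v := by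
  intro xs
  induction xs with
  | nil => simp
  | cons y t ih =>
    intro a
    by_cases h : y = v
    · subst h
      simp only [List.foldl_cons, ne_eq, not_true_eq_false, if_false, List.count_cons_self,
        List.sum_cons, ih]
      push_cast
      ring
    · simp only [List.foldl_cons, ne_eq, h, not_false_eq_true, if_true, List.sum_cons, ih,
        List.count_cons_of_ne h]
      ring

theorem sumOfElement_eq (xs : List Int) (v : Int) :
    sumOfElement xs v = xs.sum - v * xs.count v := by
  rw [sumOfElement, sumOfElement_foldl]; ring

theorem pymin_eq : (fun (m n : Int) => if m > n then n else m) = min := by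
  funext m n; rw [min_def]; split_ifs <;> omega

theorem pymax_eq : (fun (m n : Int) => if m < n then n else m) = max := by
  funext m n; rw [max_def]; split_ifs <;> omega

def pvPos (m : Int) : List Int → Int → List Int
  | [], _ => []
  | y :: t, k => (if m = y then [k] else []) ++ pvPos m t (k + 1)

theorem siv_foldl (m : Int) : ∀ (ys : List Int) (acc : List Int) (k : Int),
    (ys.foldl (fun (st : List Int × Int) n =>
      if m = n then (st.1 ++ [st.2], st.2 + 1) else (st.1, st.2 + 1)) (acc, k)).1
    = acc ++ pvPos m ys k := by
  intro ys
  induction ys with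
  | nil => simp [pvPos]
  | cons y t ih =>
    intro acc k
    by_cases h : m = y
    · subst h
      simpa [pvPos] using ih (acc ++ [k]) (k + 1)
    · simpa [pvPos, h] using ih acc (k + 1)

theorem searchIndexValue_eq (ys : List Int) (m : Int) :
    searchIndexValue ys m = pvPos m ys 0 := by
  simpa [searchIndexValue] using siv_foldl m ys [] 0

theorem getOnly_eq_map (xs idxs : List Int) :
    getOnlyIndexesValues xs idxs = idxs.map (fun i => (PySem.List.pyGet? xs i).getD 0) := by
  simpa [getOnlyIndexesValues] using PySem.List.foldl_append_singleton_eq_map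
    (f := fun i => (PySem.List.pyGet? xs i).getD 0) (l := idxs) (acc := [])

theorem pos_filter (g : Int → Int) (m : Int) : ∀ (xs pre : List Int),
    (pvPos m (xs.map g) (pre.length : Int)).map
        (fun i => (PySem.List.pyGet? (pre ++ xs) i).getD 0)
      = xs.filter (fun n => decide (m = g n)) := by
  intro xs
  induction xs with
  | nil => intro pre; simp [pvPos]
  | cons y t ih =>
    intro pre
    have h1 : (PySem.List.pyGet? (pre ++ y :: t) ((pre.length : Nat) : Int)).getD 0 = y := by
      rw [PySem.List.pyGet?_natCast]; simp
    have h2 := ih (pre ++ [y])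
    have hlen : ((pre ++ [y]).length : Int) = (pre.length : Int) + 1 := by
      simp [List.length_append]
    rw [hlen] at h2
    have hassoc : (pre ++ [y]) ++ t = pre ++ y :: t := by simp
    rw [hassoc] at h2
    by_cases h : m = g y
    · subst h
      simp [pvPos, h2]
    · simp [pvPos, h, h2]

def pvBStep (g : Int → Int) (b : Option (Int × Int)) (n : Int) : Option (Int × Int) :=
  match b with
  | none => some (g n, n)
  | some (bs, bv) => if g n < bs ∨ (g n = bs ∧ bv < n) then some (g n, n) else some (bs, bv)

def pvMaxL (l : List Int) : Int := l.foldl max (l.headD 0)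

theorem pvMaxL_append (l : List Int) (y : Int) (h : l ≠ []) :
    pvMaxL (l ++ [y]) = max (pvMaxL l) y := by
  cases l with
  | nil => exact absurd rfl h
  | cons w ws => simp [pvMaxL, List.foldl_append]

theorem pvMain (g : Int → Int) (x : Int) (t : List Int) :
    t.foldl (pvBStep g) (some (g x, x)) =
      some ((t.map g).foldl min (g x),
        pvMaxL ((x :: t).filter (fun n => decide (g n = (t.map g).foldl min (g x)))))
    ∧ (x :: t).filter (fun n => decide (g n = (t.map g).foldl min (g x))) ≠ [] := by
  induction t using List.reverseRecOn with
  | nil => simp [pvMaxL]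
  | append_singleton t y ih =>
    obtain ⟨ihf, ihne⟩ := ih
    have hM := PySem.List.foldl_min_le (t.map g) (g x)
    set M := (t.map g).foldl min (g x) with hMdef
    have hlow : ∀ n ∈ x :: t, M ≤ g n := by
      intro n hn
      rcases List.mem_cons.mp hn with h | h
      · subst h; exact hM.1
      · exact hM.2 _ (List.mem_map_of_mem h)
    have hfold : (t ++ [y]).foldl (pvBStep g) (some (g x, x)) =
        pvBStep g (some (M, pvMaxL ((x :: t).filter (fun n => decide (g n = M))))) y := by
      rw [List.foldl_append, ihf]; rfl
    have hM' : ((t ++ [y]).map g).foldl min (g x) = min M (g y) := by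
      simp [List.foldl_append, hMdef]
    have hsplit : (x :: (t ++ [y])) = (x :: t) ++ [y] := by simp
    rcases lt_trichotomy (g y) M with hc | hc | hc
    · -- new strict minimum: only y achieves it
      have hmin : min M (g y) = g y := min_eq_right hc.le
      have hnil : (x :: t).filter (fun n => decide (g n = g y)) = [] := by
        apply List.filter_eq_nil_iff.mpr
        intro n hn
        have := hlow n hn
        simp only [decide_eq_true_eq]
        omega
      constructor
      · rw [hfold, hM', hmin, hsplit, List.filter_append, hnil]
        simp [pvBStep, hc, pvMaxL]
      · rw [hM', hmin, hsplit, List.filter_append, hnil]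
        simp
    · -- ties the minimum: append y, keep the larger value
      have hmin : min M (g y) = M := by rw [hc]; simp
      have hfy : (x :: (t ++ [y])).filter (fun n => decide (g n = M)) =
          ((x :: t).filter (fun n => decide (g n = M))) ++ [y] := by
        rw [hsplit, List.filter_append]
        simp [hc]
      constructor
      · rw [hfold, hM', hmin, hfy, pvMaxL_append _ _ ihne]
        simp only [pvBStep]
        have : ¬ (g y < M) := by omega
        by_cases hv : pvMaxL ((x :: t).filter (fun n => decide (g n = M))) < y
        · simp [hc, hv]
          omega
        · simp [hc, hv]
          omega
      · rw [hM', hmin, hfy]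
        simp
    · -- above the minimum: nothing changes
      have hmin : min M (g y) = M := min_eq_left hc.le
      have hfy : (x :: (t ++ [y])).filter (fun n => decide (g n = M)) =
          (x :: t).filter (fun n => decide (g n = M)) := by
        rw [hsplit, List.filter_append]
        have : (g y = M) = False := by simp; omega
        simp [this]
      constructor
      · rw [hfold, hM', hmin, hfy]
        have h1 : ¬ (g y < M) := by omega
        have h2 : ¬ (g y = M) := by omega
        simp [pvBStep, h1, h2]
      · rw [hM', hmin, hfy]; exact ihne

theorem searchMaximum_eq_pvMaxL (l : List Int) : searchMaximum l = pvMaxL l := by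
  rw [searchMaximum, pymax_eq]; rfl

theorem final (x : Int) (t : List Int) :
    maximumElementWithMinimunSum (x :: t) = maximumElementWithMinimunSum_alt (x :: t) := by
  set g : Int → Int := fun n => (x :: t).sum - n * ((x :: t).count n : Int) with hg
  set M : Int := (t.map g).foldl min (g x) with hMdef
  -- A side
  have hmapA : (x :: t).foldl (fun acc n => acc ++ [sumOfElement (x :: t) n]) [] = (x :: t).map g := by
    rw [PySem.List.foldl_append_singleton_eq_map]
    simp only [List.nil_append]
    exact List.map_eq_map_iff.mpr (fun n _ => by rw [sumOfElement_eq, hg])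
  have hminA : searchMinimum ((x :: t).map g) = M := by
    rw [searchMinimum, pymin_eq]
    simp [hMdef]
  have hvals : getOnlyIndexesValues (x :: t) (searchIndexValue ((x :: t).map g) M)
      = (x :: t).filter (fun n => decide (g n = M)) := by
    rw [searchIndexValue_eq, getOnly_eq_map]
    have h := pos_filter g M (x :: t) []
    simp only [List.length_nil, Nat.cast_zero, List.nil_append] at h
    rw [h]
    exact List.filter_congr (fun n _ => by simp [eq_comm])
  have hA : maximumElementWithMinimunSum (x :: t)
      = pvMaxL ((x :: t).filter (fun n => decide (g n = M))) := by
    simp only [maximumElementWithMinimunSum]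
    rw [hmapA, hminA, hvals, searchMaximum_eq_pvMaxL]
  -- B side
  have hfun : (fun (b : Option (Int × Int)) n =>
      let s := (x :: t).foldl (· + ·) 0 -
        n * ((x :: t).foldl (fun (d : PySem.Dict Int Int) n => d.insert n (d.getD n 0 + 1))
          PySem.Dict.empty).getD n 0
      match b with
      | none => some (s, n)
      | some (bs, bv) => if s < bs ∨ (s = bs ∧ bv < n) then some (s, n) else some (bs, bv))
      = pvBStep g := by
    funext b n
    have hs : (x :: t).foldl (· + ·) 0 -
        n * ((x :: t).foldl (fun (d : PySem.Dict Int Int) n => d.insert n (d.getD n 0 + 1))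
          PySem.Dict.empty).getD n 0 = g n := by
      rw [PySem.Dict.getD_foldl_insert_add_one, PySem.Dict.getD_empty, ← List.sum_eq_foldl, hg]
      ring
    simp only [hs, pvBStep]
  have hB : maximumElementWithMinimunSum_alt (x :: t)
      = pvMaxL ((x :: t).filter (fun n => decide (g n = M))) := by
    simp only [maximumElementWithMinimunSum_alt]
    rw [hfun]
    rw [List.foldl_cons]
    have h0 : pvBStep g none x = some (g x, x) := rfl
    rw [h0, (pvMain g x t).1, ← hMdef]
  rw [hA, hB]

-- ===== VERDICT (by name: the statement is the Claim_ definition above) =====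
theorem maximumElementWithMinimunSum_spec : Claim_equal_maximumElementWithMinimunSum := by
  intro numbers _ hpre
  unfold Spec_maximumElementWithMinimunSum
  cases numbers with
  | nil => exact absurd rfl hpre
  | cons x t => exact final x t
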